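-- pv_equiv track=rewrite | github.com/larsks/esisdk | esi/config/loader.py | _auth_update
-- ===== SOURCE A (Python) =====
-- import copy
--
-- def _auth_update(old_dict, new_dict_source):
--     """Like dict.update, except handling the nested dict called auth."""
--     new_dict = copy.deepcopy(new_dict_source)
--     for k, v in new_dict.items():
--         if k == 'auth':
--             if k in old_dict:
--                 old_dict[k].update(v)
--             else:
--                 old_dict[k] = v.copy()
--         else:
--             old_dict[k] = v
--     return old_dict
-- ===== SOURCE B (Python) =====
-- import copy
--
-- def _auth_update(old_dict, new_dict_source):
--     """Like dict.update, except handling the nested dict called auth."""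
--     def resolve(k, old_v):
--         new_v = copy.deepcopy(new_dict_source[k])
--         if k == 'auth':
--             return {**old_v, **new_v}
--         return new_v
--     merged = {k: resolve(k, v) if k in new_dict_source else v
--               for k, v in old_dict.items()}
--     for k, v in new_dict_source.items():
--         if k not in merged:
--             merged[k] = copy.deepcopy(v)
--     old_dict.clear()
--     old_dict.update(merged)
--     return old_dict
-- ===== Notes on version B (the rewrite author's own statement) =====
-- stated objective: alternative
-- what changed: Instead of A's single in-place dispatch loop over the new dict, B rebuilds a fresh dict: a comprehension over old_dict that resolves each key's override (pre-merging the nested 'auth' sub-dict), then a second pass appending the new-only keys; Pre_ only states the dict representation invariant (no duplicate keys in the association lists), which every real Python dict satisfies.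
import Mathlib
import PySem

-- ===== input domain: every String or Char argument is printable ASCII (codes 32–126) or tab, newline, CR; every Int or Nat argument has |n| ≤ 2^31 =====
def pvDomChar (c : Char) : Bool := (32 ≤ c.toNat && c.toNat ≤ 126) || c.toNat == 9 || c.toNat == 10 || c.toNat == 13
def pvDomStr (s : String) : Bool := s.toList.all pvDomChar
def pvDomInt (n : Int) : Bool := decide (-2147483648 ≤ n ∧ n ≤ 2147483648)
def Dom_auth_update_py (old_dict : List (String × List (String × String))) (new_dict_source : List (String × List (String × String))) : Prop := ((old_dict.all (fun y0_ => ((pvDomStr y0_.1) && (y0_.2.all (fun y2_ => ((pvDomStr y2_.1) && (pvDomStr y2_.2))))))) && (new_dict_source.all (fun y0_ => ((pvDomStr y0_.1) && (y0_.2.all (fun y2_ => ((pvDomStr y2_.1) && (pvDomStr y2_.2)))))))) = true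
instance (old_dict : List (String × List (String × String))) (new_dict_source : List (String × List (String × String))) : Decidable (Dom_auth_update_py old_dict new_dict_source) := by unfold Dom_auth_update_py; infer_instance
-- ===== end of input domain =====

-- B rebuilds a fresh dict: a comprehension over old_dict resolving each key's override
-- (merging the nested 'auth'), then a pass appending new-only keys — instead of A's single
-- in-place dispatch loop over the new dict. Return-value equivalence only: A mutates
-- old_dict's existing nested auth dict in place, B replaces old_dict's contents wholesale.


-- ===== PORT A =====
-- new_dict = deepcopy(new_dict_source) is identity here (immutable values);
-- old_dict[k].update(v) on the nested dict = Dict.modify at 'auth' applying Dict.update.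
def auth_update_py (old_dict : List (String × List (String × String))) (new_dict_source : List (String × List (String × String))) : List (String × List (String × String)) :=
  (new_dict_source.foldl
    (fun (od : PySem.Dict String (List (String × String))) kv =>
      if kv.1 == "auth" then
        if od.contains kv.1 then
          od.modify kv.1 [] (fun a => (PySem.Dict.update (PySem.Dict.mk a) kv.2).items)
        else od.insert kv.1 kv.2
      else od.insert kv.1 kv.2)
    (PySem.Dict.mk old_dict)).items

-- ===== PORT B =====
-- the dict comprehension over old_dict.items() is a foldl insert from empty;
-- resolve(k, old_v) with {**old_v, **new_v} ported as Dict.update (Dict.ofList old_v) new_v;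
-- the second loop inserts only keys absent from merged; old_dict.clear()+update(merged) = merged.
def pvResolve (new_dict_source : List (String × List (String × String))) (k : String) (old_v : List (String × String)) : List (String × String) :=
  match (PySem.Dict.mk new_dict_source).get? k with
  | some new_v => if k == "auth" then (PySem.Dict.update (PySem.Dict.ofList old_v) new_v).items else new_v
  | none => old_v

def auth_update_py_alt (old_dict : List (String × List (String × String))) (new_dict_source : List (String × List (String × String))) : List (String × List (String × String)) :=
  let merged : PySem.Dict String (List (String × String)) :=
    old_dict.foldl (fun m kv => m.insert kv.1 (pvResolve new_dict_source kv.1 kv.2)) PySem.Dict.empty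
  (new_dict_source.foldl
    (fun (m : PySem.Dict String (List (String × String))) kv =>
      if m.contains kv.1 then m else m.insert kv.1 kv.2) merged).items

-- ===== PRECONDITION & SPEC =====
-- Pre_ excludes only association lists whose outer or nested key lists contain duplicates:
-- such lists do not represent Python dicts (dict keys are unique), so no actual Python input is excluded.
def pvNodupDict (d : List (String × List (String × String))) : Prop :=
  (d.map Prod.fst).Nodup ∧ ∀ p ∈ d, (p.2.map Prod.fst).Nodup

def Pre_auth_update_py (old_dict : List (String × List (String × String))) (new_dict_source : List (String × List (String × String))) : Prop :=
  pvNodupDict old_dict ∧ pvNodupDict new_dict_source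
instance (old_dict : List (String × List (String × String))) (new_dict_source : List (String × List (String × String))) : Decidable (Pre_auth_update_py old_dict new_dict_source) := by
  unfold Pre_auth_update_py pvNodupDict; infer_instance

def pvWitness_auth_update_py : (List (String × List (String × String))) × (List (String × List (String × String))) :=
  ([("auth", [("a", "1")])], [("auth", [("b", "2")]), ("x", [("c", "3")])])

def Spec_auth_update_py (old_dict : List (String × List (String × String))) (new_dict_source : List (String × List (String × String))) (out : List (String × List (String × String))) : Prop := out = auth_update_py_alt old_dict new_dict_source
instance (old_dict : List (String × List (String × String))) (new_dict_source : List (String × List (String × String))) (out : List (String × List (String × String))) : Decidable (Spec_auth_update_py old_dict new_dict_source out) := by unfold Spec_auth_update_py; infer_instance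

-- ===== CLAIM (what is proved, stated in full; the proofs are below) =====
def Claim_equal_auth_update_py : Prop := ∀ (old_dict : List (String × List (String × String))) (new_dict_source : List (String × List (String × String))), Dom_auth_update_py old_dict new_dict_source → Pre_auth_update_py old_dict new_dict_source → Spec_auth_update_py old_dict new_dict_source (auth_update_py old_dict new_dict_source)

-- ===== LEMMAS AND PROOFS =====

-- ofList of a duplicate-free association list is just mk of it.
theorem pv_ofList_eq_mk {ν : Type} (a : List (String × ν)) (h : (a.map Prod.fst).Nodup) :
    PySem.Dict.ofList a = PySem.Dict.mk a := by
  apply PySem.Dict.ext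
  show (List.foldl (fun d (p : String × ν) => d.insert p.1 p.2) PySem.Dict.empty a).items = a
  have := PySem.Dict.items_foldl_insert_fresh a Prod.fst Prod.snd PySem.Dict.empty
    (fun p _ => PySem.Dict.contains_empty p.1) h
  simpa using this

-- getD of a dict whose values all satisfy P, with a default satisfying P, satisfies P.
theorem pv_getD_prop {ν : Type} (d : PySem.Dict String ν) (k : String) (dflt : ν)
    (P : ν → Prop) (hv : ∀ p ∈ d.items, P p.2) (h0 : P dflt) : P (d.getD k dflt) := by
  rw [PySem.Dict.getD_eq_get?_getD]
  cases hg : d.get? k with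
  | none => simpa using h0
  | some v =>
      simpa using hv (k, v) (PySem.Dict.mem_items_of_get?_eq_some d hg)

-- A's dict.update-style semantics on duplicate-free lists, as map-over-old ++ filter-of-new.
theorem pv_update_items {ν : Type} (l : List (String × ν)) :
    ∀ d : PySem.Dict String ν, d.keys.Nodup → (l.map Prod.fst).Nodup →
    (PySem.Dict.update d l).items
      = d.items.map (fun p => (p.1, (PySem.Dict.mk l).getD p.1 p.2))
        ++ l.filter (fun q => !d.contains q.1) := by
  induction l with
  | nil =>
    intro d _ _
    show d.items = d.items.map (fun p => (p.1, (PySem.Dict.mk ([] : List (String × ν))).getD p.1 p.2)) ++ []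
    simp [PySem.Dict.getD_eq_get?_getD, PySem.Dict.get?]
  | cons q t ih =>
    intro d hd hl
    obtain ⟨qk, qv⟩ := q
    simp only [List.map_cons, List.nodup_cons] at hl
    obtain ⟨hqt, ht⟩ := hl
    have hqt' : ∀ r ∈ t, r.1 ≠ qk := by
      intro r hr h
      exact hqt (h ▸ List.mem_map_of_mem (f := Prod.fst) hr)
    have step : PySem.Dict.update d ((qk, qv) :: t) = PySem.Dict.update (d.insert qk qv) t := rfl
    have hdq : (d.insert qk qv).keys.Nodup := PySem.Dict.nodup_keys_insert d qk qv hd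
    rw [step, ih (d.insert qk qv) hdq ht]
    have hgd_cons : ∀ (p : String × ν), p.1 ≠ qk →
        (PySem.Dict.mk t).getD p.1 p.2 = (PySem.Dict.mk ((qk, qv) :: t)).getD p.1 p.2 := by
      intro p hp
      simp [PySem.Dict.getD_eq_get?_getD, PySem.Dict.get?_mk_cons,
        show (qk == p.1) = false by simpa using fun h => hp h.symm]
    have hgd_t_self : ∀ (w : ν), (PySem.Dict.mk t).getD qk w = w := by
      intro w
      have : (PySem.Dict.mk t).contains qk = false := by
        rw [PySem.Dict.contains_mk]
        simp only [List.any_eq_false]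
        intro r hr
        simpa using hqt' r hr
      exact PySem.Dict.getD_of_not_contains _ _ this
    have hfil : t.filter (fun r => !(d.insert qk qv).contains r.1)
        = t.filter (fun r => !d.contains r.1) := by
      apply List.filter_congr
      intro r hr
      rw [PySem.Dict.contains_insert]
      simp [show (r.1 == qk) = false by simpa using hqt' r hr]
    by_cases hc : d.contains qk = true
    · rw [PySem.Dict.items_insert_of_contains _ _ hc, hfil, List.map_map]
      have hmap : ∀ p ∈ d.items,
          ((fun p => (p.1, (PySem.Dict.mk t).getD p.1 p.2)) ∘
            (fun p : String × ν => if p.1 == qk then (qk, qv) else p)) p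
          = (p.1, (PySem.Dict.mk ((qk, qv) :: t)).getD p.1 p.2) := by
        intro p _
        by_cases hpq : p.1 = qk
        · simp only [Function.comp, hpq, beq_self_eq_true, if_true, hgd_t_self]
          rw [show (PySem.Dict.mk ((qk, qv) :: t)).getD qk p.2 = qv by
            simp [PySem.Dict.getD_eq_get?_getD, PySem.Dict.get?_mk_cons]]
        · simp only [Function.comp, show (p.1 == qk) = false by simpa using hpq,
            Bool.false_eq_true, if_false]
          rw [hgd_cons p hpq]
      rw [List.map_congr_left hmap]
      have : ((qk, qv) :: t).filter (fun r => !d.contains r.1) = t.filter (fun r => !d.contains r.1) := by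
        simp [hc]
      rw [this]
    · have hc' : d.contains qk = false := eq_false_of_ne_true hc
      rw [PySem.Dict.items_insert_of_not_contains _ _ hc', hfil, List.map_append]
      have hmap : ∀ p ∈ d.items,
          (fun p : String × ν => (p.1, (PySem.Dict.mk t).getD p.1 p.2)) p
          = (p.1, (PySem.Dict.mk ((qk, qv) :: t)).getD p.1 p.2) := by
        intro p hp
        have hpq : p.1 ≠ qk := by
          intro h
          have : d.contains qk = true := by
            rw [PySem.Dict.contains_eq_decide_mem_keys]
            simpa using h ▸ PySem.Dict.mem_keys_of_mem_items d hp
          simp [this] at hc'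
        exact congrArg _ (by rw [hgd_cons p hpq])
      rw [List.map_congr_left hmap]
      have : ((qk, qv) :: t).filter (fun r => !d.contains r.1) = (qk, qv) :: t.filter (fun r => !d.contains r.1) := by
        simp [hc']
      rw [this]
      simp [hgd_t_self]

-- B's skip-if-present loop appends exactly the keys absent from the accumulator.
theorem pv_skip_items {ν : Type} (l : List (String × ν)) :
    ∀ m : PySem.Dict String ν, (l.map Prod.fst).Nodup →
    (l.foldl (fun m kv => if m.contains kv.1 then m else m.insert kv.1 kv.2) m).items
      = m.items ++ l.filter (fun q => !m.contains q.1) := by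
  induction l with
  | nil => intro m _; simp
  | cons q t ih =>
    intro m hl
    simp only [List.map_cons, List.nodup_cons] at hl
    obtain ⟨hqt, ht⟩ := hl
    have hqt' : ∀ r ∈ t, r.1 ≠ q.1 := by
      intro r hr h
      exact hqt (h ▸ List.mem_map_of_mem (f := Prod.fst) hr)
    rw [List.foldl_cons]
    by_cases hc : m.contains q.1 = true
    · rw [if_pos hc, ih m ht]
      simp [hc]
    · have hc' : m.contains q.1 = false := eq_false_of_ne_true hc
      rw [if_neg (by simp [hc']), ih _ ht,
        PySem.Dict.items_insert_of_not_contains _ _ hc']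
      have : t.filter (fun r => !(m.insert q.1 q.2).contains r.1)
          = t.filter (fun r => !m.contains r.1) := by
        apply List.filter_congr
        intro r hr
        rw [PySem.Dict.contains_insert]
        simp [show (r.1 == q.1) = false by simpa using hqt' r hr]
      rw [this]
      simp [hc']

-- B's comprehension over old_dict is a fresh-keys insert loop: its items are a map over old_dict.
theorem pv_merged_items (old_dict new_dict_source : List (String × List (String × String)))
    (h : (old_dict.map Prod.fst).Nodup) :
    (old_dict.foldl (fun m kv => m.insert kv.1 (pvResolve new_dict_source kv.1 kv.2))
        (PySem.Dict.empty : PySem.Dict String (List (String × String)))).items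
      = old_dict.map (fun p => (p.1, pvResolve new_dict_source p.1 p.2)) := by
  have := PySem.Dict.items_foldl_insert_fresh old_dict Prod.fst
    (fun p => pvResolve new_dict_source p.1 p.2) PySem.Dict.empty
    (fun p _ => PySem.Dict.contains_empty p.1) h
  simpa using this

-- the loop body of A, named for the proofs (definitionally the lambda in auth_update_py)
def pvAstep (od : PySem.Dict String (List (String × String))) (kv : String × List (String × String)) : PySem.Dict String (List (String × String)) :=
  if kv.1 == "auth" then
    if od.contains kv.1 then
      od.modify kv.1 [] (fun a => (PySem.Dict.update (PySem.Dict.mk a) kv.2).items)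
    else od.insert kv.1 kv.2
  else od.insert kv.1 kv.2

theorem pvAstep_ne (od : PySem.Dict String (List (String × String))) (k : String)
    (v : List (String × String)) (hk : k ≠ "auth") : pvAstep od (k, v) = od.insert k v := by
  simp [pvAstep, show (k == "auth") = false by simpa using hk]

theorem pvAstep_auth (od : PySem.Dict String (List (String × String))) (v : List (String × String))
    (hod : ((od.getD "auth" []).map Prod.fst).Nodup) (hv : (v.map Prod.fst).Nodup) :
    pvAstep od ("auth", v)
      = od.insert "auth" ((PySem.Dict.update (PySem.Dict.ofList (od.getD "auth" [])) v).items) := by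
  by_cases hc : od.contains "auth" = true
  · simp [pvAstep, hc, PySem.Dict.modify, pv_ofList_eq_mk _ hod]
  · have h0 : od.getD "auth" [] = [] :=
      PySem.Dict.getD_of_not_contains od [] (eq_false_of_ne_true hc)
    have hv' : (PySem.Dict.update (PySem.Dict.ofList (od.getD "auth" [])) v).items = v := by
      rw [h0]
      show (PySem.Dict.ofList v).items = v
      rw [pv_ofList_eq_mk v hv]
    simp [pvAstep, hc, hv']

-- cons step for insert at "auth" past a different head key
theorem pv_insert_cons_ne {ν : Type} (k : String) (v : ν) (t : List (String × ν)) (m : ν)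
    (hk : k ≠ "auth") :
    ((PySem.Dict.mk ((k, v) :: t)).insert "auth" m).items
      = (k, v) :: ((PySem.Dict.mk t).insert "auth" m).items := by
  have hb : (k == "auth") = false := by simpa using hk
  by_cases hc : (PySem.Dict.mk t).contains "auth" = true
  · have hcany : List.any t (fun p => p.1 == "auth") = true := by
      simpa [PySem.Dict.contains_mk] using hc
    have hc' : (PySem.Dict.mk ((k, v) :: t)).contains "auth" = true := by
      simp [PySem.Dict.contains_mk, List.any_cons, hcany]
    rw [PySem.Dict.items_insert_of_contains _ _ hc', PySem.Dict.items_insert_of_contains _ _ hc]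
    simp only [List.map_cons, hb]
    rfl
  · have hc2 : ({ items := t } : PySem.Dict String ν).contains "auth" = false :=
      eq_false_of_ne_true hc
    have hcany : List.any t (fun p => p.1 == "auth") = false := by
      simpa [PySem.Dict.contains_mk] using hc2
    have hc' : (PySem.Dict.mk ((k, v) :: t)).contains "auth" = false := by
      simp [PySem.Dict.contains_mk, List.any_cons, hb, hcany]
    simp [PySem.Dict.insert, hc', hc2]

-- main loop invariant: A's dispatch loop equals one update with the auth entry pre-merged
theorem pv_main (l : List (String × List (String × String))) :
    ∀ od : PySem.Dict String (List (String × String)),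
    (l.map Prod.fst).Nodup →
    (∀ p ∈ l, p.1 = "auth" → (p.2.map Prod.fst).Nodup) →
    ((od.getD "auth" []).map Prod.fst).Nodup →
    l.foldl pvAstep od
    = PySem.Dict.update od
        (if (PySem.Dict.mk l).contains "auth" then
          ((PySem.Dict.mk l).insert "auth" ((PySem.Dict.update (PySem.Dict.ofList (od.getD "auth" [])) ((PySem.Dict.mk l).getD "auth" [])).items)).items
        else l) := by
  induction l with
  | nil =>
    intro od _ _ _
    simp [PySem.Dict.update, PySem.Dict.contains_mk]
  | cons hd t ih =>
    intro od hnd hval hod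
    obtain ⟨k, v⟩ := hd
    simp only [List.map_cons, List.nodup_cons] at hnd
    obtain ⟨hknt, hndt⟩ := hnd
    by_cases hk : k = "auth"
    · subst hk
      have hv : (v.map Prod.fst).Nodup := hval ("auth", v) (List.mem_cons_self) rfl
      have hno : List.any t (fun p => p.1 == "auth") = false := by
        simp only [List.any_eq_false]
        intro p hp hbe
        exact hknt (by simpa [eq_of_beq hbe] using List.mem_map_of_mem (f := Prod.fst) hp)
      have hct : (PySem.Dict.mk t).contains "auth" = false := by
        simpa [PySem.Dict.contains_mk] using hno
      set m := (PySem.Dict.update (PySem.Dict.ofList (od.getD "auth" [])) v).items with hm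
      have hmnd : (m.map Prod.fst).Nodup := by
        have := PySem.Dict.nodup_keys_update (PySem.Dict.ofList (od.getD "auth" [])) v
          (PySem.Dict.nodup_keys_ofList _)
        simpa [PySem.Dict.keys] using this
      have hstep : pvAstep od ("auth", v) = od.insert "auth" m := pvAstep_auth od v hod hv
      have hod1 : (((od.insert "auth" m).getD "auth" []).map Prod.fst).Nodup := by
        rw [PySem.Dict.getD_insert_self od "auth" m []]
        exact hmnd
      have hih := ih (od.insert "auth" m) hndt
        (fun p hp hpa => hval p (List.mem_cons_of_mem _ hp) hpa) hod1
      rw [hct, if_neg (by simp)] at hih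
      have hcc : (PySem.Dict.mk (("auth", v) :: t)).contains "auth" = true := by
        simp [PySem.Dict.contains_mk, List.any_cons]
      have hgd : (PySem.Dict.mk (("auth", v) :: t)).getD "auth" [] = v := by
        simp [PySem.Dict.getD_eq_get?_getD, PySem.Dict.get?_mk_cons]
      have hitems : ((PySem.Dict.mk (("auth", v) :: t)).insert "auth" m).items = ("auth", m) :: t := by
        rw [PySem.Dict.items_insert_of_contains _ _ hcc]
        simp only [List.map_cons]
        rw [show (if (("auth", v).1 == "auth") = true then ("auth", m) else ("auth", v)) = ("auth", m) by simp]
        congr 1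
        rw [List.map_congr_left, List.map_id]
        intro p hp
        have : (p.1 == "auth") = false := by
          revert hno
          simp only [List.any_eq_false]
          intro h
          simpa using h p hp
        simp [this]
      rw [List.foldl_cons, hstep, hih, if_pos hcc, hgd, ← hm, hitems]
      rfl
    · have hbk : (k == "auth") = false := by simpa using hk
      have hod' : (((od.insert k v).getD "auth" []).map Prod.fst).Nodup := by
        rw [PySem.Dict.getD_insert_of_ne od v [] (fun h => hk h.symm)]
        exact hod
      have hih := ih (od.insert k v) hndt
        (fun p hp hpa => hval p (List.mem_cons_of_mem _ hp) hpa) hod'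
      have hgde : (od.insert k v).getD "auth" [] = od.getD "auth" [] :=
        PySem.Dict.getD_insert_of_ne od v [] (fun h => hk h.symm)
      have hcons_eq : (PySem.Dict.mk ((k, v) :: t)).contains "auth" = (PySem.Dict.mk t).contains "auth" := by
        simp [PySem.Dict.contains_mk, List.any_cons, hbk]
      have hgd_eq : (PySem.Dict.mk ((k, v) :: t)).getD "auth" [] = (PySem.Dict.mk t).getD "auth" [] := by
        simp [PySem.Dict.getD_eq_get?_getD, PySem.Dict.get?_mk_cons, hbk]
      rw [List.foldl_cons, pvAstep_ne od k v hk, hih]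
      by_cases hct : (PySem.Dict.mk t).contains "auth" = true
      · rw [if_pos hct, if_pos (by rw [hcons_eq]; exact hct), hgd_eq, hgde,
            pv_insert_cons_ne k v t _ hk]
        rfl
      · have hcf : (PySem.Dict.mk t).contains "auth" = false := eq_false_of_ne_true hct
        rw [if_neg (by simp [hcf]), if_neg (by simp [hcons_eq, hcf])]
        rfl

-- ===== VERDICT (by name: the statement is the Claim_ definition above) =====
-- the value B's resolve computes agrees with A's pre-merged dict at every old key
theorem pv_value_eq (old_dict new_dict_source : List (String × List (String × String)))
    (hok : (old_dict.map Prod.fst).Nodup)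
    (p : String × List (String × String)) (hp : p ∈ old_dict) :
    (PySem.Dict.mk
      (if (PySem.Dict.mk new_dict_source).contains "auth" then
        ((PySem.Dict.mk new_dict_source).insert "auth"
          ((PySem.Dict.update (PySem.Dict.ofList ((PySem.Dict.mk old_dict).getD "auth" []))
            ((PySem.Dict.mk new_dict_source).getD "auth" [])).items)).items
      else new_dict_source)).getD p.1 p.2
    = pvResolve new_dict_source p.1 p.2 := by
  have hko : (PySem.Dict.mk old_dict).keys.Nodup := by simpa [PySem.Dict.keys] using hok
  by_cases hca : (PySem.Dict.mk new_dict_source).contains "auth" = true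
  · rw [if_pos hca]
    have hmk : (PySem.Dict.mk ((PySem.Dict.mk new_dict_source).insert "auth"
        ((PySem.Dict.update (PySem.Dict.ofList ((PySem.Dict.mk old_dict).getD "auth" []))
          ((PySem.Dict.mk new_dict_source).getD "auth" [])).items)).items)
        = (PySem.Dict.mk new_dict_source).insert "auth"
        ((PySem.Dict.update (PySem.Dict.ofList ((PySem.Dict.mk old_dict).getD "auth" []))
          ((PySem.Dict.mk new_dict_source).getD "auth" [])).items) := rfl
    rw [hmk]
    by_cases hpa : p.1 = "auth"
    · rw [hpa, PySem.Dict.getD_insert_self]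
      cases hg : (PySem.Dict.mk new_dict_source).get? "auth" with
      | none =>
          rw [PySem.Dict.contains_eq_isSome_get?, hg] at hca
          simp at hca
      | some nv =>
          have hgo : (PySem.Dict.mk old_dict).getD "auth" [] = p.2 := by
            rw [← hpa]
            exact PySem.Dict.getD_of_mem_items _ (by simpa using hp) hko []
          have hgn : (PySem.Dict.mk new_dict_source).getD "auth" [] = nv :=
            PySem.Dict.getD_of_get?_eq_some _ _ hg
          simp [pvResolve, hg, hgo, hgn]
    · rw [PySem.Dict.getD_insert_of_ne _ _ _ hpa]
      cases hg : (PySem.Dict.mk new_dict_source).get? p.1 with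
      | none => simp [pvResolve, hg, PySem.Dict.getD_of_get?_eq_none _ _ hg]
      | some nv =>
          simp [pvResolve, hg, show (p.1 == "auth") = false by simpa using hpa,
            PySem.Dict.getD_of_get?_eq_some _ _ hg]
  · rw [if_neg hca]
    cases hg : (PySem.Dict.mk new_dict_source).get? p.1 with
    | none => simp [pvResolve, hg, PySem.Dict.getD_of_get?_eq_none _ _ hg]
    | some nv =>
        have hpa : p.1 ≠ "auth" := by
          intro h
          rw [PySem.Dict.contains_eq_isSome_get?, ← h, hg] at hca
          simp at hca
        simp [pvResolve, hg, show (p.1 == "auth") = false by simpa using hpa,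
          PySem.Dict.getD_of_get?_eq_some _ _ hg]

-- the appended (new-only) entries agree: A filters the pre-merged list, B the original one
theorem pv_filter_eq (old_dict new_dict_source : List (String × List (String × String)))
    (hnk : (new_dict_source.map Prod.fst).Nodup)
    (hnv : ∀ p ∈ new_dict_source, (p.2.map Prod.fst).Nodup) :
    (if (PySem.Dict.mk new_dict_source).contains "auth" then
      ((PySem.Dict.mk new_dict_source).insert "auth"
        ((PySem.Dict.update (PySem.Dict.ofList ((PySem.Dict.mk old_dict).getD "auth" []))
          ((PySem.Dict.mk new_dict_source).getD "auth" [])).items)).items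
    else new_dict_source).filter (fun q => !(PySem.Dict.mk old_dict).contains q.1)
    = new_dict_source.filter (fun q => !(PySem.Dict.mk old_dict).contains q.1) := by
  have hkn : (PySem.Dict.mk new_dict_source).keys.Nodup := by simpa [PySem.Dict.keys] using hnk
  by_cases hca : (PySem.Dict.mk new_dict_source).contains "auth" = true
  · rw [if_pos hca, PySem.Dict.items_insert_of_contains _ _ hca]
    have hg1 : ∀ q : String × List (String × String),
        ((fun p : String × List (String × String) => if p.1 == "auth" then ("auth",
          (PySem.Dict.update (PySem.Dict.ofList ((PySem.Dict.mk old_dict).getD "auth" []))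
            ((PySem.Dict.mk new_dict_source).getD "auth" [])).items) else p) q).1 = q.1 := by
      intro q
      by_cases hb : (q.1 == "auth") = true
      · simp [(eq_of_beq hb).symm]
      · simp [eq_false_of_ne_true hb]
    rw [List.filter_map]
    have hpred : new_dict_source.filter
        ((fun q => !(PySem.Dict.mk old_dict).contains q.1) ∘
          (fun p : String × List (String × String) => if p.1 == "auth" then ("auth",
            (PySem.Dict.update (PySem.Dict.ofList ((PySem.Dict.mk old_dict).getD "auth" []))
              ((PySem.Dict.mk new_dict_source).getD "auth" [])).items) else p))
        = new_dict_source.filter (fun q => !(PySem.Dict.mk old_dict).contains q.1) := by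
      apply List.filter_congr
      intro q _
      simp only [Function.comp]
      rw [hg1 q]
    rw [hpred]
    have hid : ∀ q ∈ new_dict_source.filter (fun q => !(PySem.Dict.mk old_dict).contains q.1),
        (fun p : String × List (String × String) => if p.1 == "auth" then ("auth",
          (PySem.Dict.update (PySem.Dict.ofList ((PySem.Dict.mk old_dict).getD "auth" []))
            ((PySem.Dict.mk new_dict_source).getD "auth" [])).items) else p) q = id q := by
      intro q hq
      rw [List.mem_filter] at hq
      obtain ⟨hqm, hqf⟩ := hq
      simp only [id]
      by_cases hb : (q.1 == "auth") = true
      · have hqa : q.1 = "auth" := eq_of_beq hb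
        have hoc : (PySem.Dict.mk old_dict).contains q.1 = false := by
          cases h : (PySem.Dict.mk old_dict).contains q.1
          · rfl
          · rw [h] at hqf; simp at hqf
        have hgo : (PySem.Dict.mk old_dict).getD "auth" [] = [] :=
          PySem.Dict.getD_of_not_contains _ _ (hqa ▸ hoc)
        have hgn : (PySem.Dict.mk new_dict_source).getD "auth" [] = q.2 := by
          have : (PySem.Dict.mk new_dict_source).get? q.1 = some q.2 :=
            PySem.Dict.get?_of_mem_items _ (by simpa using hqm) hkn
          rw [← hqa]
          exact PySem.Dict.getD_of_get?_eq_some _ _ this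
        have hvn : (q.2.map Prod.fst).Nodup := hnv q hqm
        have hM : (PySem.Dict.update (PySem.Dict.ofList ((PySem.Dict.mk old_dict).getD "auth" []))
            ((PySem.Dict.mk new_dict_source).getD "auth" [])).items = q.2 := by
          rw [hgo, hgn]
          show (PySem.Dict.ofList q.2).items = q.2
          rw [pv_ofList_eq_mk q.2 hvn]
        rw [if_pos hb, hM, ← hqa]
      · rw [if_neg hb]
    rw [List.map_congr_left hid, List.map_id]
  · rw [if_neg hca]

-- B's comprehension dict has exactly old_dict's keys
theorem pv_merged_contains (old_dict new_dict_source : List (String × List (String × String)))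
    (hok : (old_dict.map Prod.fst).Nodup) (k : String) :
    (old_dict.foldl (fun m kv => m.insert kv.1 (pvResolve new_dict_source kv.1 kv.2))
        (PySem.Dict.empty : PySem.Dict String (List (String × String)))).contains k
      = (PySem.Dict.mk old_dict).contains k := by
  have h1 := pv_merged_items old_dict new_dict_source hok
  have h2 : (old_dict.foldl (fun m kv => m.insert kv.1 (pvResolve new_dict_source kv.1 kv.2))
      (PySem.Dict.empty : PySem.Dict String (List (String × String))))
      = PySem.Dict.mk (old_dict.map (fun p => (p.1, pvResolve new_dict_source p.1 p.2))) :=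
    PySem.Dict.ext h1
  rw [h2, PySem.Dict.contains_mk, PySem.Dict.contains_mk, List.any_map]
  rfl

-- ===== VERDICT (by name: the statement is the Claim_ definition above) =====
theorem auth_update_py_spec : Claim_equal_auth_update_py := by
  intro old_dict new_dict_source _hdom hpre
  obtain ⟨⟨hok, hov⟩, ⟨hnk, hnv⟩⟩ := hpre
  unfold Spec_auth_update_py auth_update_py auth_update_py_alt
  show (List.foldl pvAstep (PySem.Dict.mk old_dict) new_dict_source).items = _
  rw [pv_main new_dict_source (PySem.Dict.mk old_dict) hnk
      (fun p hp _ => hnv p hp)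
      (pv_getD_prop (PySem.Dict.mk old_dict) "auth" [] (fun v => (v.map Prod.fst).Nodup)
        (fun p hp => hov p hp) List.nodup_nil)]
  have hko : (PySem.Dict.mk old_dict).keys.Nodup := by simpa [PySem.Dict.keys] using hok
  have hLnd : ((if (PySem.Dict.mk new_dict_source).contains "auth" then
      ((PySem.Dict.mk new_dict_source).insert "auth"
        ((PySem.Dict.update (PySem.Dict.ofList ((PySem.Dict.mk old_dict).getD "auth" []))
          ((PySem.Dict.mk new_dict_source).getD "auth" [])).items)).items
    else new_dict_source).map Prod.fst).Nodup := by
    by_cases hca : (PySem.Dict.mk new_dict_source).contains "auth" = true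
    · rw [if_pos hca]
      have := PySem.Dict.nodup_keys_insert (PySem.Dict.mk new_dict_source) "auth"
        ((PySem.Dict.update (PySem.Dict.ofList ((PySem.Dict.mk old_dict).getD "auth" []))
          ((PySem.Dict.mk new_dict_source).getD "auth" [])).items)
        (by simpa [PySem.Dict.keys] using hnk)
      simpa [PySem.Dict.keys] using this
    · rw [if_neg hca]; exact hnk
  rw [pv_update_items _ (PySem.Dict.mk old_dict) hko hLnd]
  rw [pv_skip_items new_dict_source _ hnk]
  rw [pv_merged_items old_dict new_dict_source hok]
  have hfil2 : new_dict_source.filter (fun q =>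
      !(old_dict.foldl (fun m kv => m.insert kv.1 (pvResolve new_dict_source kv.1 kv.2))
        (PySem.Dict.empty : PySem.Dict String (List (String × String)))).contains q.1)
      = new_dict_source.filter (fun q => !(PySem.Dict.mk old_dict).contains q.1) := by
    apply List.filter_congr
    intro q _
    rw [pv_merged_contains old_dict new_dict_source hok q.1]
  rw [hfil2, pv_filter_eq old_dict new_dict_source hnk hnv]
  have hmap : (PySem.Dict.mk old_dict).items.map (fun p => (p.1,
      (PySem.Dict.mk (if (PySem.Dict.mk new_dict_source).contains "auth" then
        ((PySem.Dict.mk new_dict_source).insert "auth"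
          ((PySem.Dict.update (PySem.Dict.ofList ((PySem.Dict.mk old_dict).getD "auth" []))
            ((PySem.Dict.mk new_dict_source).getD "auth" [])).items)).items
      else new_dict_source)).getD p.1 p.2))
      = old_dict.map (fun p => (p.1, pvResolve new_dict_source p.1 p.2)) := by
    apply List.map_congr_left
    intro p hp
    rw [pv_value_eq old_dict new_dict_source hok p hp]
  exact congrArg₂ (· ++ ·) hmap rfl
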